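-- pv_equiv track=rewrite | github.com/kofort9/sentry | scripts/update_models.py | update_env_variable
-- ===== SOURCE A (Python) =====
-- def update_env_variable(content: str, var_name: str, new_value: str) -> str:
--     """Update an environment variable in .env content."""
--     lines = content.split('\n')
--     updated_lines = []
--
--     for line in lines:
--         if line.startswith(f"{var_name}="):
--             updated_lines.append(f"{var_name}={new_value}")
--         else:
--             updated_lines.append(line)
--
--     return '\n'.join(updated_lines)
-- ===== SOURCE B (Python) =====
-- def update_env_variable(content: str, var_name: str, new_value: str) -> str:
--     """Update an environment variable in .env content (single streaming pass, no line list)."""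
--     prefix = var_name + "="
--     replacement = prefix + new_value
--     out = []
--     i = 0
--     while True:
--         # invariant: i is at the start of a line
--         if content.startswith(prefix, i):
--             out.append(replacement)
--             j = content.find("\n", i + len(prefix))
--         else:
--             j = content.find("\n", i)
--             out.append(content[i:] if j == -1 else content[i:j])
--         if j == -1:
--             break
--         out.append("\n")
--         i = j + 1
--     return "".join(out)
-- ===== Notes on version B (the rewrite author's own statement) =====
-- stated objective: alternative
-- what changed: Replaces split-into-lines / transform / join with a single streaming scan over the content that matches the 'NAME=' prefix at each line start and copies or rewrites up to the next newline, never materialising the list of lines.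
-- outside the precondition, e.g. on update_env_variable('a\nb=1', 'a\nb', 'x'): A returns 'a\nb=1', B returns 'a\nb=x'
import Mathlib
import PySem

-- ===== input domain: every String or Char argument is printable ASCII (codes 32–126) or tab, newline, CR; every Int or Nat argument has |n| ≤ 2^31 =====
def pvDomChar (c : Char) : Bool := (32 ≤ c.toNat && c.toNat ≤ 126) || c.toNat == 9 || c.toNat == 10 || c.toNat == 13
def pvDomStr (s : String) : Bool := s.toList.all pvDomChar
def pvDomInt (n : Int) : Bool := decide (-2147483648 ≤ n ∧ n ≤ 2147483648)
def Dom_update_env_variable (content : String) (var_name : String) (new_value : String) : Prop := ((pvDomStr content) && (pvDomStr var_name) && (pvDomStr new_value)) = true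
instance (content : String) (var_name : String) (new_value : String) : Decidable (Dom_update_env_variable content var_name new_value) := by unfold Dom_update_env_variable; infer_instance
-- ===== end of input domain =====

-- B replaces A's split/transform/join over a line list by a single streaming scan of the content; equivalent on var_names without a newline.


-- ===== PORT A =====
-- lines = content.split('\n'); loop appending the rewritten/kept line; '\n'.join(...)
def update_env_variable (content : String) (var_name : String) (new_value : String) : String :=
  let lines := (PySem.Str.split? content "\n").getD []
  -- NOTE: split('\n') with a non-empty separator never raises; split? returns some here
  let updated_lines := lines.foldl
    (fun acc line =>
      if PySem.Str.startswith line (var_name ++ "=") then acc ++ [var_name ++ "=" ++ new_value]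
      else acc ++ [line]) ([] : List String)
  PySem.Str.join "\n" updated_lines

-- ===== PORT B =====
-- the while-loop of Source B: recursion on the remaining suffix of content; at each call the
-- suffix begins at a line start; startswith ≡ isPrefixOf, find('\n', ...) ≡ dropWhile/takeWhile
def pvScan (pre repl : List Char) (s : List Char) : List Char :=
  if pre.isPrefixOf s then
    match _h : (s.drop pre.length).dropWhile (· ≠ '\n') with
    | [] => repl
    | _ :: tail => repl ++ '\n' :: pvScan pre repl tail
  else
    match _h : s.dropWhile (· ≠ '\n') with
    | [] => s
    | _ :: tail => s.takeWhile (· ≠ '\n') ++ '\n' :: pvScan pre repl tail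
termination_by s.length
decreasing_by
  · have h1 := List.length_dropWhile_le (p := fun c => decide (c ≠ '\n')) (l := s.drop pre.length)
    have h2 : (s.drop pre.length).length = s.length - pre.length := List.length_drop
    rw [_h] at h1; simp only [List.length_cons] at h1; omega
  · have h1 := List.length_dropWhile_le (p := fun c => decide (c ≠ '\n')) (l := s)
    rw [_h] at h1; simp only [List.length_cons] at h1; omega

def update_env_variable_alt (content : String) (var_name : String) (new_value : String) : String :=
  String.ofList (pvScan (var_name.toList ++ ['=']) (var_name.toList ++ '=' :: new_value.toList) content.toList)

-- ===== PRECONDITION & SPEC =====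
-- Pre_ restricts to the natural domain: an environment-variable NAME cannot contain a newline;
-- excluded are only the degenerate inputs where var_name contains a newline AND "var_name=" occurs
-- in the content, where A's per-line startswith never matches but B's stream-level prefix match
-- can span the line break.
def Pre_update_env_variable (content : String) (var_name : String) (new_value : String) : Prop :=
  '\n' ∉ var_name.toList ∨ PySem.Str.isIn (var_name ++ "=") content = false
instance (content : String) (var_name : String) (new_value : String) : Decidable (Pre_update_env_variable content var_name new_value) := by unfold Pre_update_env_variable; infer_instance
def pvWitness_update_env_variable : String × String × String := ("API_KEY=old\nDEBUG=1", "API_KEY", "new")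

def Spec_update_env_variable (content : String) (var_name : String) (new_value : String) (out : String) : Prop := out = update_env_variable_alt content var_name new_value
instance (content : String) (var_name : String) (new_value : String) (out : String) : Decidable (Spec_update_env_variable content var_name new_value out) := by unfold Spec_update_env_variable; infer_instance

-- ===== CLAIM (what is proved, stated in full; the proofs are below) =====
def Claim_equal_update_env_variable : Prop := ∀ (content : String) (var_name : String) (new_value : String), Dom_update_env_variable content var_name new_value → Pre_update_env_variable content var_name new_value → Spec_update_env_variable content var_name new_value (update_env_variable content var_name new_value)

-- ===== LEMMAS AND PROOFS =====

-- lines of a char list, split at '\n' (reference shape of Python's content.split('\n'))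
def pvLines : List Char → List (List Char)
  | [] => [[]]
  | c :: rest =>
    if c = '\n' then [] :: pvLines rest
    else match pvLines rest with
      | [] => [[c]]
      | p :: ps => (c :: p) :: ps

def pvConsHead (x : List Char) : List (List Char) → List (List Char)
  | [] => [x]
  | p :: ps => (x ++ p) :: ps

lemma pvLines_ne_nil (s : List Char) : pvLines s ≠ [] := by
  cases s with
  | nil => simp [pvLines]
  | cons c r =>
    simp only [pvLines]
    split
    · simp
    · split <;> simp

lemma pvDropHead {p : Char → Bool} {l t : List Char} {c : Char}
    (h : l.dropWhile p = c :: t) : p c = false := by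
  induction l with
  | nil => simp at h
  | cons a r ih =>
    rw [List.dropWhile_cons] at h
    split at h
    · exact ih h
    · rename_i hpa
      cases h
      simpa using hpa

lemma pvLines_no_nl {s : List Char} (h : s.dropWhile (fun c => decide (c ≠ '\n')) = []) :
    pvLines s = [s] := by
  induction s with
  | nil => rfl
  | cons c r ih =>
    rw [List.dropWhile_cons] at h
    split at h
    · rename_i hc
      simp only [decide_eq_true_eq] at hc
      simp [pvLines, hc, ih h]
    · simp at h

lemma pvLines_split {s : List Char} {t : List Char}
    (h : s.dropWhile (fun c => decide (c ≠ '\n')) = '\n' :: t) :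
    pvLines s = s.takeWhile (fun c => decide (c ≠ '\n')) :: pvLines t := by
  induction s generalizing t with
  | nil => simp at h
  | cons c r ih =>
    rw [List.dropWhile_cons] at h
    by_cases hc : c = '\n'
    · subst hc
      simp only [ne_eq, not_true_eq_false, decide_false, Bool.false_eq_true, if_false,
        List.cons.injEq, true_and] at h
      subst h
      simp [pvLines]
    · rw [if_pos (by simpa using hc)] at h
      simp [pvLines, hc, ih h]

lemma pvGo (fuel : Nat) : ∀ (l cur : List Char) (acc : List (List Char)), l.length < fuel →
    PySem.Chars.splitOn.go ['\n'] fuel l cur acc = acc.reverse ++ pvConsHead cur.reverse (pvLines l) := by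
  induction fuel with
  | zero => intro l cur acc h; omega
  | succ n ih =>
    intro l cur acc h
    cases l with
    | nil => simp [PySem.Chars.splitOn.go, pvLines, pvConsHead]
    | cons c rest =>
      by_cases hc : c = '\n'
      · subst hc
        have hp : List.isPrefixOf ['\n'] ('\n' :: rest) = true := by
          simp [List.isPrefixOf]
        simp only [PySem.Chars.splitOn.go, hp, if_pos, List.length_cons, List.length_nil,
          List.drop_succ_cons, List.drop_zero]
        rw [ih rest [] (cur.reverse :: acc) (by simp at h; omega)]
        cases hq : pvLines rest with
        | nil => exact absurd hq (pvLines_ne_nil rest)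
        | cons q qs => simp [pvLines, pvConsHead, hq]
      · have hp : List.isPrefixOf ['\n'] (c :: rest) = false := by
          simp [List.isPrefixOf]
          exact fun he => absurd he.symm hc
        simp only [PySem.Chars.splitOn.go, hp, Bool.false_eq_true, if_false]
        rw [ih rest (c :: cur) acc (by simp at h; omega)]
        cases hq : pvLines rest with
        | nil => exact absurd hq (pvLines_ne_nil rest)
        | cons q qs => simp [pvLines, pvConsHead, hq, hc]

lemma pvSplitOn_eq (s : List Char) : PySem.Chars.splitOn s ['\n'] = pvLines s := by
  unfold PySem.Chars.splitOn
  rw [pvGo (s.length + 1) s [] [] (by omega)]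
  cases hp : pvLines s with
  | nil => exact absurd hp (pvLines_ne_nil s)
  | cons p ps => simp [pvConsHead]

lemma pvJoin_single (a : List Char) : PySem.Chars.join ['\n'] [a] = a := by
  simp [PySem.Chars.join, List.intercalate]

lemma pvJoin_cons (a b : List Char) (l : List (List Char)) :
    PySem.Chars.join ['\n'] (a :: b :: l) = a ++ '\n' :: PySem.Chars.join ['\n'] (b :: l) := by
  simp [PySem.Chars.join, List.intercalate]

-- the heart: the streaming scan equals map-over-lines + join
lemma pvScan_eq (pre repl : List Char) (hnl : '\n' ∉ pre) (s : List Char) :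
    pvScan pre repl s =
      PySem.Chars.join ['\n'] ((pvLines s).map (fun l => if pre.isPrefixOf l then repl else l)) := by
  fun_induction pvScan pre repl s with
  | case1 s h1 h2 =>
    obtain ⟨t, ht⟩ := List.isPrefixOf_iff_prefix.mp h1
    have hdt : s.drop pre.length = t := by rw [← ht]; simp
    rw [hdt] at h2
    have hs : s.dropWhile (fun c => decide (c ≠ '\n')) = [] := by
      rw [← ht]
      apply List.dropWhile_eq_nil_iff.mpr
      intro x hx
      rcases List.mem_append.mp hx with hx | hx
      · simp; exact fun he => hnl (he ▸ hx)
      · exact List.dropWhile_eq_nil_iff.mp h2 x hx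
    rw [pvLines_no_nl hs]
    simp only [List.map_cons, List.map_nil, h1, if_pos, pvJoin_single]
  | case2 s h1 x tail h2 ih =>
    obtain ⟨t, ht⟩ := List.isPrefixOf_iff_prefix.mp h1
    have hdt : s.drop pre.length = t := by rw [← ht]; simp
    rw [hdt] at h2
    have hx : x = '\n' := by
      have := pvDropHead h2
      simpa using this
    subst hx
    have hpredrop : pre.dropWhile (fun c => decide (c ≠ '\n')) = [] :=
      List.dropWhile_eq_nil_iff.mpr (fun y hy => by simp; exact fun he => hnl (he ▸ hy))
    have hdw : s.dropWhile (fun c => decide (c ≠ '\n')) = '\n' :: tail := by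
      rw [← ht, List.dropWhile_append, hpredrop]
      simpa using h2
    have hpretake : pre.takeWhile (fun c => decide (c ≠ '\n')) = pre :=
      List.takeWhile_eq_self_iff.mpr (fun y hy => by simp; exact fun he => hnl (he ▸ hy))
    have htw : s.takeWhile (fun c => decide (c ≠ '\n')) =
        pre ++ t.takeWhile (fun c => decide (c ≠ '\n')) := by
      rw [← ht, List.takeWhile_append, hpretake, if_pos rfl]
    have hftw : pre.isPrefixOf (s.takeWhile (fun c => decide (c ≠ '\n'))) = true :=
      List.isPrefixOf_iff_prefix.mpr ⟨_, htw.symm⟩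
    rw [pvLines_split hdw]
    cases hq : pvLines tail with
    | nil => exact absurd hq (pvLines_ne_nil tail)
    | cons q qs =>
      rw [hq] at ih
      simp only [List.map_cons, hftw, if_pos, pvJoin_cons]
      rw [ih]
      simp
  | case3 s h1 h2 =>
    rw [pvLines_no_nl h2]
    simp only [List.map_cons, List.map_nil, h1, Bool.false_eq_true, if_false, pvJoin_single]
  | case4 s h1 x tail h2 ih =>
    have hx : x = '\n' := by
      have := pvDropHead h2
      simpa using this
    subst hx
    have hftw : pre.isPrefixOf (s.takeWhile (fun c => decide (c ≠ '\n'))) = false := by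
      apply Bool.eq_false_iff.mpr
      intro hcon
      have h1' : pre.isPrefixOf s = true :=
        List.isPrefixOf_iff_prefix.mpr
          ((List.isPrefixOf_iff_prefix.mp hcon).trans (List.takeWhile_prefix _))
      simp [h1'] at h1
    rw [pvLines_split h2]
    cases hq : pvLines tail with
    | nil => exact absurd hq (pvLines_ne_nil tail)
    | cons q qs =>
      rw [hq] at ih
      simp only [List.map_cons, hftw, Bool.false_eq_true, if_false, pvJoin_cons]
      rw [ih]
      simp

lemma pvFoldl (P : String → Bool) (r : String) :
    ∀ (L acc : List String),
      L.foldl (fun acc line => if P line then acc ++ [r] else acc ++ [line]) acc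
        = acc ++ L.map (fun line => if P line then r else line) := by
  intro L
  induction L with
  | nil => simp
  | cons x xs ih =>
    intro acc
    rw [List.foldl_cons, ih]
    cases hP : P x <;> simp [hP]

-- when the pattern does not occur in the content at all, the scan is the identity
lemma pvScan_id (pre repl : List Char) (s : List Char) (h : ¬ pre <:+: s) :
    pvScan pre repl s = s := by
  fun_induction pvScan pre repl s with
  | case1 s h1 h2 =>
    exact absurd (List.isPrefixOf_iff_prefix.mp h1).isInfix h
  | case2 s h1 x tail h2 ih =>
    exact absurd (List.isPrefixOf_iff_prefix.mp h1).isInfix h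
  | case3 s h1 h2 => rfl
  | case4 s h1 x tail h2 ih =>
    have hx : x = '\n' := by simpa using pvDropHead h2
    subst hx
    have hts : tail <:+ s :=
      (List.suffix_cons '\n' tail).trans (h2 ▸ List.dropWhile_suffix _)
    rw [ih (fun hc => h (hc.trans hts.isInfix))]
    conv_rhs => rw [← List.takeWhile_append_dropWhile (p := fun c => decide (c ≠ '\n')) (l := s)]
    rw [h2]

-- joining the lines back gives the content
lemma pvJoin_pvLines (s : List Char) : PySem.Chars.join ['\n'] (pvLines s) = s := by
  induction s with
  | nil => simp [pvLines]
  | cons c r ih =>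
    cases hq : pvLines r with
    | nil => exact absurd hq (pvLines_ne_nil r)
    | cons q qs =>
      rw [hq] at ih
      by_cases hc : c = '\n'
      · subst hc
        rw [show pvLines ('\n' :: r) = [] :: q :: qs from by simp [pvLines, hq]]
        rw [pvJoin_cons, ih]
        rfl
      · rw [show pvLines (c :: r) = (c :: q) :: qs from by simp [pvLines, hc, hq]]
        cases qs with
        | nil => rw [pvJoin_single] at ih ⊢; rw [ih]
        | cons q2 qs2 =>
          rw [pvJoin_cons] at ih ⊢
          rw [← ih]
          simp

-- every line is an infix of the content
lemma pvLines_infix (n : Nat) : ∀ s : List Char, s.length ≤ n → ∀ l ∈ pvLines s, l <:+: s := by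
  induction n with
  | zero =>
    intro s hs l hl
    have hnil : s = [] := List.length_eq_zero_iff.mp (Nat.le_zero.mp hs)
    subst hnil
    simp [pvLines] at hl
    simp [hl]
  | succ n ih =>
    intro s hs l hl
    cases hdw : s.dropWhile (fun c => decide (c ≠ '\n')) with
    | nil =>
      rw [pvLines_no_nl hdw] at hl
      simp at hl
      simp [hl]
    | cons x t =>
      have hx : x = '\n' := by simpa using pvDropHead hdw
      subst hx
      rw [pvLines_split hdw] at hl
      rcases List.mem_cons.mp hl with hl | hl
      · exact hl ▸ (List.takeWhile_prefix _).isInfix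
      · have hts : t <:+ s :=
          (List.suffix_cons '\n' t).trans (hdw ▸ List.dropWhile_suffix _)
        have hlen : t.length ≤ n := by
          have := hts.length_le
          have h1 : ('\n' :: t) <:+ s := hdw ▸ List.dropWhile_suffix _
          have := h1.length_le
          simp at this
          omega
        exact (ih t hlen l hl).trans hts.isInfix

-- ===== VERDICT (by name: the statement is the Claim_ definition above) =====
theorem update_env_variable_spec : Claim_equal_update_env_variable := by
  intro c v n _hd hpre
  unfold Spec_update_env_variable update_env_variable update_env_variable_alt
  -- resolve A's split
  have hsm := PySem.Str.split?_map c "\n"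
  have hchars : PySem.Chars.split? c.toList ("\n" : String).toList
      = some (pvLines c.toList) := by
    show PySem.Chars.split? c.toList ['\n'] = some (pvLines c.toList)
    rw [PySem.Chars.split?]
    simp [pvSplitOn_eq]
  rw [hchars] at hsm
  cases hs : PySem.Str.split? c "\n" with
  | none => rw [hs] at hsm; simp at hsm
  | some L =>
    rw [hs] at hsm
    simp only [Option.map_some, Option.some.injEq] at hsm
    simp only [Option.getD_some]
    rw [pvFoldl (fun line => PySem.Str.startswith line (v ++ "=")) (v ++ "=" ++ n) L []]
    rw [List.nil_append]
    have hpveq : ((v ++ "=") : String).toList = v.toList ++ ['='] := by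
      rw [String.toList_append]; rfl
    have hpre' : '\n' ∉ v.toList ∨ PySem.Str.isIn (v ++ "=") c = false := hpre
    rcases hpre' with hnl | hno
    · have hnl2 : '\n' ∉ v.toList ++ ['='] := by
        intro hm
        rcases List.mem_append.mp hm with hm | hm
        · exact hnl hm
        · simp at hm
      rw [pvScan_eq _ _ hnl2]
      rw [← hsm]
      simp only [PySem.Str.join]
      apply congrArg String.ofList
      have h1 : ("\n" : String).toList = ['\n'] := rfl
      rw [h1]
      apply congrArg (PySem.Chars.join ['\n'])
      rw [List.map_map, List.map_map]
      apply List.map_congr_left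
      intro line _
      simp only [Function.comp_apply, apply_ite String.toList, PySem.Str.startswith_eq,
        PySem.Chars.startswith, String.toList_append]
      have h2 : ("=" : String).toList = ['='] := rfl
      rw [h2]
      simp
    · have hinf : ¬ (v.toList ++ ['=']) <:+: c.toList := by
        rw [PySem.Str.isIn_eq, hpveq] at hno
        exact (PySem.Chars.isIn_eq_false_iff _ _).mp hno
      rw [pvScan_id _ _ _ hinf, String.ofList_toList]
      have hmapid : L.map (fun line =>
          if PySem.Str.startswith line (v ++ "=") = true then v ++ "=" ++ n else line) = L := by
        have hid : ∀ line ∈ L,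
            (if PySem.Str.startswith line (v ++ "=") = true then v ++ "=" ++ n else line) = line := by
          intro line hline
          have hmem : line.toList ∈ pvLines c.toList := by
            rw [← hsm]
            exact List.mem_map_of_mem hline
          have hninf : ¬ (v.toList ++ ['=']).isPrefixOf line.toList = true := by
            intro hp
            exact hinf ((List.isPrefixOf_iff_prefix.mp hp).isInfix.trans
              (pvLines_infix c.toList.length c.toList le_rfl line.toList hmem))
          have hsw : PySem.Str.startswith line (v ++ "=") = false := by
            rw [PySem.Str.startswith_eq, hpveq]
            simpa [PySem.Chars.startswith] using Bool.eq_false_iff.mpr hninf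
          rw [hsw]
          simp
        calc L.map _ = L.map id := List.map_congr_left hid
          _ = L := List.map_id L
      rw [hmapid]
      have hjl : (PySem.Str.join "\n" L).toList = c.toList := by
        rw [PySem.Str.toList_join]
        rw [show ("\n" : String).toList = ['\n'] from rfl, hsm, pvJoin_pvLines]
      calc PySem.Str.join "\n" L
          = String.ofList (PySem.Str.join "\n" L).toList := String.ofList_toList.symm
        _ = String.ofList c.toList := by rw [hjl]
        _ = c := String.ofList_toList
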